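-- pv_equiv track=rewrite | github.com/BarthJr/URI-Online-Judge | Strings/2242.py | verify_laugh
-- ===== SOURCE A (Python) =====
-- def verify_laugh(laugh):
--     chunks = []
--     for char in laugh:
--         if char in 'aeiou':
--             chunks.append(char)
--     laugh_without_consonants = ''.join(chunks)
--     if laugh_without_consonants == ''.join(reversed(laugh_without_consonants)):
--         return 'S'
--     else:
--         return 'N'
-- ===== SOURCE B (Python) =====
-- def verify_laugh(laugh):
--     v = [c for c in laugh if c in 'aeiou']
--     i, j = 0, len(v) - 1
--     while i < j:
--         if v[i] != v[j]:
--             return 'N'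
--         i += 1
--         j -= 1
--     return 'S'
-- ===== Notes on version B (the rewrite author's own statement) =====
-- stated objective: alternative
-- what changed: Replaces build-reversed-copy-and-compare with an in-place two-pointer palindrome scan over the filtered vowels that exits early at the first mismatch.
import Mathlib
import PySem

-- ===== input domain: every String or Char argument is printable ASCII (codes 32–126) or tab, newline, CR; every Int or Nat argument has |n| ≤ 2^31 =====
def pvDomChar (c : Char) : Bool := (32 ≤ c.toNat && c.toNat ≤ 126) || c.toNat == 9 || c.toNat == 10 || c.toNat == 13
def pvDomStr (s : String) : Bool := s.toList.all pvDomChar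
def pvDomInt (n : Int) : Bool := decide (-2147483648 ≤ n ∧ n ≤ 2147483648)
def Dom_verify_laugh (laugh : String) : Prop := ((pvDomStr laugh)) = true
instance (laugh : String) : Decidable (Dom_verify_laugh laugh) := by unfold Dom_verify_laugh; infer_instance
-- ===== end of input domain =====

-- B replaces A's reverse-and-compare with a two-pointer scan of the filtered vowels (early exit); alternative, same cost.

-- 'char in "aeiou"' for a single character (both programs use this test)
def pvIsVowel (c : Char) : Bool := PySem.Chars.isIn [c] ['a', 'e', 'i', 'o', 'u']

-- ===== PORT A =====
def verify_laugh (laugh : String) : String :=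
  -- chunks = []; for char in laugh: if char in 'aeiou': chunks.append(char)
  let chunks : List Char :=
    laugh.toList.foldl (fun acc c => if pvIsVowel c then acc ++ [c] else acc) []
  -- laugh_without_consonants = ''.join(chunks); compare with ''.join(reversed(...))
  if chunks = chunks.reverse then "S" else "N"

-- ===== PORT B =====
-- while i < j: if v[i] != v[j]: return 'N'; i += 1; j -= 1   (v[i], v[j] always in range here)
def pvTwoPtr (v : List Char) (i j : Nat) : Bool :=
  if i < j then
    if v.getD i ' ' ≠ v.getD j ' ' then false
    else pvTwoPtr v (i + 1) (j - 1)
  else true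
termination_by j - i

def verify_laugh_alt (laugh : String) : String :=
  let v : List Char := laugh.toList.filter pvIsVowel
  if pvTwoPtr v 0 (v.length - 1) then "S" else "N"

-- ===== PRECONDITION & SPEC =====
def Spec_verify_laugh (laugh : String) (out : String) : Prop := out = verify_laugh_alt laugh
instance (laugh : String) (out : String) : Decidable (Spec_verify_laugh laugh out) := by unfold Spec_verify_laugh; infer_instance

-- ===== CLAIM (what is proved, stated in full; the proofs are below) =====
def Claim_equal_verify_laugh : Prop := ∀ (laugh : String), Dom_verify_laugh laugh → Spec_verify_laugh laugh (verify_laugh laugh)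

-- ===== LEMMAS AND PROOFS =====

-- the two-pointer loop checks exactly the mirrored-pair equalities for indices in [i, j]
theorem pvTwoPtr_iff (v : List Char) :
    ∀ (d i j : Nat), j - i = d → i + j = v.length - 1 →
      (pvTwoPtr v i j = true ↔
        ∀ k, i ≤ k → k ≤ j → v.getD k ' ' = v.getD (v.length - 1 - k) ' ') := by
  intro d
  induction d using Nat.strong_induction_on with
  | _ d ih =>
    intro i j hd hsum
    rw [pvTwoPtr]
    by_cases hij : i < j
    · simp only [hij, if_true]
      by_cases hne : v.getD i ' ' = v.getD j ' '
      · simp only [hne, ne_eq, not_true_eq_false, if_false]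
        have hrec := ih (j - 1 - (i + 1)) (by omega) (i + 1) (j - 1) rfl (by omega)
        rw [hrec]
        constructor
        · intro h k hk1 hk2
          by_cases hki : k = i
          · subst hki
            rw [show v.length - 1 - k = j by omega]; exact hne
          · by_cases hkj : k = j
            · subst hkj
              rw [show v.length - 1 - k = i by omega]; exact hne.symm
            · exact h k (by omega) (by omega)
        · intro h k hk1 hk2
          exact h k (by omega) (by omega)
      · simp only [hne, ne_eq, not_false_eq_true, if_true]
        constructor
        · intro h; simp at h
        · intro h
          exact absurd (by have := h i le_rfl (by omega);
                           rwa [show v.length - 1 - i = j by omega] at this) hne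
    · simp only [hij, if_false]
      constructor
      · intro _ k hk1 hk2
        have hk : k = i := by omega
        subst hk
        rw [show v.length - 1 - k = k by omega]
      · intro _; trivial

theorem reverse_eq_iff_pairs (v : List Char) :
    (v = v.reverse) ↔ ∀ k, 0 ≤ k → k ≤ v.length - 1 → v.getD k ' ' = v.getD (v.length - 1 - k) ' ' := by
  constructor
  · intro h k _ hk
    by_cases hlen : k < v.length
    · have h1 : v.length - 1 - k < v.length := by omega
      have hc := congrArg (fun l => l.getD k ' ') h
      simp only at hc
      rw [hc, List.getD_eq_getElem _ _ (by simpa using hlen), List.getElem_reverse,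
        List.getD_eq_getElem _ _ h1]
    · have hlen0 : v.length = 0 := by omega
      have hnil : v = [] := List.eq_nil_of_length_eq_zero hlen0
      subst hnil; simp
  · intro h
    apply List.ext_getElem (by simp)
    intro k hk1 hk2
    rw [List.getElem_reverse]
    have h1 := h k (by omega) (by omega)
    rw [List.getD_eq_getElem _ _ hk1, List.getD_eq_getElem _ _ (by omega)] at h1
    exact h1

theorem pvTwoPtr_eq_reverse_check (v : List Char) :
    pvTwoPtr v 0 (v.length - 1) = true ↔ v = v.reverse := by
  rw [pvTwoPtr_iff v (v.length - 1) 0 (v.length - 1) (by omega) (by omega),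
    reverse_eq_iff_pairs]

-- ===== VERDICT (by name: the statement is the Claim_ definition above) =====
theorem verify_laugh_spec : Claim_equal_verify_laugh := by
  intro laugh _
  unfold Spec_verify_laugh verify_laugh verify_laugh_alt
  rw [PySem.List.foldl_append_if_eq_filter]
  simp only [List.nil_append]
  set v := laugh.toList.filter pvIsVowel with hv
  by_cases h : v = v.reverse
  · rw [if_pos h, if_pos ((pvTwoPtr_eq_reverse_check v).mpr h)]
  · rw [if_neg h, if_neg (by rw [pvTwoPtr_eq_reverse_check v]; exact h)]
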